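-- pv_equiv track=rewrite | github.com/quentin8469/01-Warhammer_fullstack | warhammer/utils.py | dict_players_attak_rank
-- ===== SOURCE A (Python) =====
-- def dict_players_attak_rank(autre_truc):
--     """
--     Create a revers ordered dictionnary with the list_players_attak_rank
--     return a dictionnary {"init nb" : (list_players_attak_rank),}
--     """
--     dico_un = {}
--     dico_deux = {}
--     for k, v in autre_truc:
--         dico_un.setdefault(k, []).append(v)
--     test = sorted(dico_un.items(), reverse=True)
--     for i in range(len(dico_un)):
--         dico_deux[f"init {i}"] = test[i]
--     return dico_deux
-- ===== SOURCE B (Python) =====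
-- def dict_players_attak_rank(autre_truc):
--     """
--     Sort the pairs once by key in descending order (stable), then sweep the
--     sorted list collecting consecutive equal-key runs, labelling each run
--     "init i" as it is produced.
--     """
--     ordered = sorted(autre_truc, key=lambda kv: kv[0], reverse=True)
--     result = {}
--     n = len(ordered)
--     i = 0
--     j = 0
--     while j < n:
--         k = ordered[j][0]
--         vals = []
--         while j < n and ordered[j][0] == k:
--             vals.append(ordered[j][1])
--             j += 1
--         result[f"init {i}"] = (k, vals)
--         i += 1
--     return result
-- ===== Notes on version B (the rewrite author's own statement) =====
-- stated objective: alternative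
-- what changed: A groups pairs into a dict, sorts the dict items in reverse, and fills the output by indexing with range(len); B instead stably sorts the raw pairs by key descending once and sweeps the sorted list, collecting consecutive equal-key runs and labelling each run as it is produced.
import Mathlib
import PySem

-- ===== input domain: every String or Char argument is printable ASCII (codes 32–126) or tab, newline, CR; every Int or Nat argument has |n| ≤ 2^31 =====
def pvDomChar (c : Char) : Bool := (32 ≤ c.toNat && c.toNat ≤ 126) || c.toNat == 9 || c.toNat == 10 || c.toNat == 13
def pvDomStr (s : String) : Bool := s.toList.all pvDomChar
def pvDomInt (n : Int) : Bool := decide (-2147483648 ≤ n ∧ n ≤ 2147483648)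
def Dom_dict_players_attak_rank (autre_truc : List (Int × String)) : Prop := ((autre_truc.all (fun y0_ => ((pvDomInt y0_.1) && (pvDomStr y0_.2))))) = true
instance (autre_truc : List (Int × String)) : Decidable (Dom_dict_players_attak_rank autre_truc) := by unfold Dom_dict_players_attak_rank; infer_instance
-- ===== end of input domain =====

-- B replaces A's group-into-dict / sort-items / index-by-range pipeline by one stable
-- descending sort of the raw pairs followed by a single consecutive-run sweep (alternative
-- decomposition, same cost class).

-- f"init {i}"  (shared by both ports)
def pvLabel (i : Int) : String := String.ofList (['i', 'n', 'i', 't', ' '] ++ PySem.Int.toChars i)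

-- ===== PORT A =====
def dict_players_attak_rank (autre_truc : List (Int × String)) : List (String × Int × List String) :=
  -- for k, v in autre_truc: dico_un.setdefault(k, []).append(v)
  let dicoUn : PySem.Dict Int (List String) :=
    autre_truc.foldl (fun d p => d.modify p.1 [] (fun l => l ++ [p.2])) PySem.Dict.empty
  -- test = sorted(dico_un.items(), reverse=True): dict keys are unique, so Python's
  -- tuple comparison is decided by the first component (exact on every input)
  let test := PySem.List.sorted dicoUn.items (fun p => p.1) true
  -- for i in range(len(dico_un)): dico_deux[f"init {i}"] = test[i]
  let dicoDeux : PySem.Dict String (Int × List String) :=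
    (PySem.List.pyRange 0 (dicoUn.size : Int) 1).foldl
      (fun d i => d.insert (pvLabel i) (PySem.List.pyGetD test i (0, []))) PySem.Dict.empty
  dicoDeux.items

-- ===== PORT B =====
-- inner while: collect the values of the run of key k, return (vals, remainder)
def pvTakeRun (k : Int) : List (Int × String) → List String × List (Int × String)
  | [] => ([], [])
  | (k', v) :: rest =>
    if k' = k then
      let r := pvTakeRun k rest
      (v :: r.1, r.2)
    else ([], (k', v) :: rest)

theorem pvTakeRun_snd_length (k : Int) (xs : List (Int × String)) :
    (pvTakeRun k xs).2.length ≤ xs.length := by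
  induction xs with
  | nil => simp [pvTakeRun]
  | cons p rest ih =>
    obtain ⟨k', v⟩ := p
    simp only [pvTakeRun]
    split
    · simpa using Nat.le_succ_of_le ih
    · simp

-- outer while: sweep the sorted list run by run, labelling runs "init i"
def pvGroupLoop (i : Int) : List (Int × String) → List (String × Int × List String)
  | [] => []
  | (k, v) :: rest =>
    let r := pvTakeRun k rest
    (pvLabel i, k, v :: r.1) :: pvGroupLoop (i + 1) r.2
  termination_by xs => xs.length
  decreasing_by
    simpa using Nat.lt_succ_of_le (pvTakeRun_snd_length k rest)

def dict_players_attak_rank_alt (autre_truc : List (Int × String)) : List (String × Int × List String) :=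
  pvGroupLoop 0 (PySem.List.sorted autre_truc (fun p => p.1) true)

-- ===== PRECONDITION & SPEC =====
def Spec_dict_players_attak_rank (autre_truc : List (Int × String)) (out : List (String × Int × List String)) : Prop := out = dict_players_attak_rank_alt autre_truc
instance (autre_truc : List (Int × String)) (out : List (String × Int × List String)) : Decidable (Spec_dict_players_attak_rank autre_truc out) := by unfold Spec_dict_players_attak_rank; infer_instance

-- ===== CLAIM (what is proved, stated in full; the proofs are below) =====
def Claim_equal_dict_players_attak_rank : Prop := ∀ (autre_truc : List (Int × String)), Dom_dict_players_attak_rank autre_truc → Spec_dict_players_attak_rank autre_truc (dict_players_attak_rank autre_truc)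

-- ===== LEMMAS AND PROOFS =====

-- decoding decimal digit lists: str(·) is injective on Nat
def pvDec (cs : List Char) : Nat := cs.foldl (fun a c => a * 10 + (c.toNat - 48)) 0

theorem pvDec_append (l : List Char) (c : Char) :
    pvDec (l ++ [c]) = pvDec l * 10 + (c.toNat - 48) := by
  simp [pvDec, List.foldl_append]

theorem pvDigitChar (d : Nat) (h : d < 10) : (Nat.digitChar d).toNat - 48 = d := by
  interval_cases d <;> decide

theorem pvDec_toDigits (n : Nat) : pvDec (Nat.toDigits 10 n) = n := by
  induction n using Nat.strong_induction_on with
  | _ n ih =>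
    rw [Nat.toDigits_eq_if (by norm_num)]
    split
    · next h => simp [pvDec, pvDigitChar n h]
    · next h =>
      rw [pvDec_append, ih (n / 10) (Nat.div_lt_self (by omega) (by norm_num)),
        pvDigitChar _ (Nat.mod_lt _ (by norm_num))]
      omega

theorem pvLabel_inj {a b : Int} (ha : 0 ≤ a) (hb : 0 ≤ b) (h : pvLabel a = pvLabel b) : a = b := by
  have h' := congrArg String.toList h
  simp only [pvLabel] at h'
  simp at h'
  have hc : PySem.Int.toChars a = PySem.Int.toChars b := h'
  simp only [PySem.Int.toChars, if_neg (by omega : ¬ a < 0), if_neg (by omega : ¬ b < 0)] at hc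
  have := congrArg pvDec hc
  rw [pvDec_toDigits, pvDec_toDigits] at this
  omega

-- stability of the descending sort: filtering one key class commutes with sorting
theorem pvFilter_insertBy (c : Int) (x : Int × String) (ys : List (Int × String))
    (h : ys.Pairwise (fun a b => b.1 ≤ a.1)) :
    (PySem.List.insertBy (fun a b => decide (b.1 < a.1)) x ys).filter (fun y => y.1 == c)
      = ys.filter (fun y => y.1 == c) ++ if x.1 == c then [x] else [] := by
  induction ys with
  | nil =>
    simp only [PySem.List.insertBy, List.filter_nil, List.nil_append, List.filter_cons]
  | cons y ys ih =>
    rw [List.pairwise_cons] at h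
    obtain ⟨h1, h2⟩ := h
    rw [PySem.List.insertBy]
    split
    · next hlt =>
      simp only [decide_eq_true_eq] at hlt
      by_cases hx : (x.1 == c) = true
      · have hxc : x.1 = c := by simpa using hx
        have hnil : (y :: ys).filter (fun y => y.1 == c) = [] := by
          rw [List.filter_eq_nil_iff]
          intro z hz
          simp only [beq_iff_eq]
          rcases List.mem_cons.1 hz with rfl | hz'
          · omega
          · have := h1 z hz'; omega
        rw [List.filter_cons_of_pos (by simpa using hx), hnil, if_pos hx]
        simp
      · rw [List.filter_cons_of_neg (by simpa using hx), if_neg hx, List.append_nil]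
    · next hlt =>
      simp only [List.filter_cons, ih h2]
      split <;> simp


theorem pvSorted_filter (c : Int) (xs : List (Int × String)) :
    (PySem.List.sorted xs (fun p => p.1) true).filter (fun y => y.1 == c)
      = xs.filter (fun y => y.1 == c) := by
  induction xs using List.reverseRecOn with
  | nil => simp [PySem.List.sorted_rev_eq_foldl_insertBy]
  | append_singleton l x ih =>
    have hfold := PySem.List.sorted_rev_eq_foldl_insertBy (l ++ [x]) (fun p : Int × String => p.1)
    rw [List.foldl_append] at hfold
    rw [hfold, List.foldl_cons, List.foldl_nil,
      ← PySem.List.sorted_rev_eq_foldl_insertBy l (fun p : Int × String => p.1),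
      pvFilter_insertBy c x _ (PySem.List.sorted_pairwise_rev l _), ih,
      List.filter_append]
    simp [List.filter_cons]


-- set-of-list commutes with filter
theorem pvOfList_filter (l : List Int) (p : Int → Bool) :
    (PySem.Set.ofList l).filter p = PySem.Set.ofList (l.filter p) := by
  induction l with
  | nil => simp [PySem.Set.ofList_nil]
  | cons x xs ih =>
    rw [PySem.Set.ofList_cons, List.filter_cons]
    by_cases hp : p x = true
    · rw [if_pos hp, List.filter_cons_of_pos hp, PySem.Set.ofList_cons, ← ih,
        PySem.Set.discard, PySem.Set.discard, List.filter_comm]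
    · rw [if_neg hp, List.filter_cons_of_neg hp, ← ih, PySem.Set.discard, List.filter_filter]
      congr 1
      funext y
      by_cases hy : y = x
      · subst hy; simp [hp]
      · simp [hy]


theorem pvOfList_sublist (l : List Int) : (PySem.Set.ofList l).Sublist l := by
  induction l with
  | nil => simp [PySem.Set.ofList_nil]
  | cons x xs ih =>
    rw [PySem.Set.ofList_cons]
    exact List.Sublist.cons₂ x ((List.filter_sublist).trans ih)


-- the run collector, on a list whose keys are all ≤ k and descending
theorem pvTakeRun_spec (k : Int) (rest : List (Int × String))
    (hp : rest.Pairwise (fun a b => b.1 ≤ a.1)) (hle : ∀ e ∈ rest, e.1 ≤ k) :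
    (pvTakeRun k rest).1 = (rest.filter (fun e => e.1 == k)).map (·.2)
      ∧ (pvTakeRun k rest).2 = rest.filter (fun e => !(e.1 == k)) := by
  induction rest with
  | nil => simp [pvTakeRun]
  | cons p rest ih =>
    obtain ⟨k', v⟩ := p
    rw [List.pairwise_cons] at hp
    obtain ⟨h1, h2⟩ := hp
    have hle' : ∀ e ∈ rest, e.1 ≤ k := fun e he => hle e (List.mem_cons_of_mem _ he)
    simp only [pvTakeRun]
    split
    · next heq =>
      subst heq
      obtain ⟨ih1, ih2⟩ := ih h2 hle'
      constructor
      · simp [ih1]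
      · simp [ih2]
    · next hne =>
      have hklt : k' < k := lt_of_le_of_ne (hle (k', v) (List.mem_cons_self)) hne
      have hall : ∀ e ∈ rest, e.1 < k := fun e he => lt_of_le_of_lt (h1 e he) hklt
      constructor
      · have : ((k', v) :: rest).filter (fun e => e.1 == k) = [] := by
          rw [List.filter_eq_nil_iff]
          intro z hz
          simp only [beq_iff_eq]
          rcases List.mem_cons.1 hz with rfl | hz'
          · omega
          · have := hall z hz'; omega
        simp [this]
      · have : ((k', v) :: rest).filter (fun e => !(e.1 == k)) = (k', v) :: rest := by
          rw [List.filter_eq_self]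
          intro z hz
          simp only [Bool.not_eq_eq_eq_not, Bool.not_true, beq_eq_false_iff_ne, ne_eq]
          rcases List.mem_cons.1 hz with rfl | hz'
          · omega
          · have := hall z hz'; omega
        simp [this]


-- the sweep, on any key-descending list
theorem pvGroupLoop_eq (xs : List (Int × String)) (hp : xs.Pairwise (fun a b => b.1 ≤ a.1)) (i : Int) :
    pvGroupLoop i xs
      = (PySem.List.enumerate (PySem.Set.ofList (xs.map (·.1))) i).map
          (fun p => (pvLabel p.1, p.2, (xs.filter (fun e => e.1 == p.2)).map (·.2))) := by
  induction hn : xs.length using Nat.strong_induction_on generalizing xs i with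
  | _ n ih =>
  match xs, hp with
  | [], _ => simp [pvGroupLoop, PySem.Set.ofList_nil]
  | (k, v) :: rest, hp =>
    rw [List.pairwise_cons] at hp
    obtain ⟨h1, h2⟩ := hp
    obtain ⟨hr1, hr2⟩ := pvTakeRun_spec k rest h2 (fun e he => h1 e he)
    -- length for IH
    have hlen : (pvTakeRun k rest).2.length < n := by
      rw [← hn]; simpa using Nat.lt_succ_of_le (pvTakeRun_snd_length k rest)
    have hp2 : (pvTakeRun k rest).2.Pairwise (fun a b => b.1 ≤ a.1) := by
      rw [hr2]; exact h2.sublist (List.filter_sublist)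
    -- key list decomposition
    have hkeys : PySem.Set.ofList (k :: rest.map (·.1))
        = k :: PySem.Set.ofList (((pvTakeRun k rest).2).map (·.1)) := by
      rw [PySem.Set.ofList_cons, PySem.Set.discard, pvOfList_filter, hr2]
      congr 2
      rw [List.filter_map]
      rfl
    rw [pvGroupLoop]
    simp only [List.map_cons]
    rw [hkeys, PySem.List.enumerate_cons, List.map_cons]
    congr 1
    · -- head
      have : ((k, v) :: rest).filter (fun e => e.1 == k) = (k, v) :: rest.filter (fun e => e.1 == k) := by
        simp
      rw [this]
      simp [hr1]
    · -- tail
      rw [ih _ hlen _ hp2 (i+1) rfl]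
      apply List.map_congr_left
      intro p hpmem
      have hp2mem : p.2 ∈ ((pvTakeRun k rest).2).map (·.1) := by
        have : p.2 ∈ (PySem.List.enumerate (PySem.Set.ofList (((pvTakeRun k rest).2).map (·.1))) (i+1)).map (·.2) :=
          List.mem_map_of_mem hpmem
        rw [PySem.List.map_snd_enumerate] at this
        exact (PySem.Set.mem_ofList _ _).1 this
      obtain ⟨e, hemem, heq⟩ := List.mem_map.1 hp2mem
      have hene : e.1 ≠ k := by
        rw [hr2] at hemem
        have := List.of_mem_filter hemem
        simpa using this
      have hpk : p.2 ≠ k := heq ▸ hene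
      -- filters agree at key p.2
      have hfil : ((k, v) :: rest).filter (fun e => e.1 == p.2)
          = ((pvTakeRun k rest).2).filter (fun e => e.1 == p.2) := by
        rw [hr2, List.filter_filter, List.filter_cons_of_neg (by simpa using (Ne.symm hpk))]
        congr 1
        funext z
        by_cases hz : z.1 = p.2
        · simp [hz, hpk]
        · simp [hz]
      rw [hfil]


-- enumerate-as-range-indexing
theorem pvEnum_map {β : Type} (F : Int → Int → β) (d : Int) (Y : List Int) (s : Int) :
    (PySem.List.enumerate Y s).map (fun p => F p.1 p.2)
      = (List.range Y.length).map (fun (j : Nat) => F (s + (j : Int)) (Y.getD j d)) := by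
  induction Y generalizing s with
  | nil => simp [PySem.List.enumerate]
  | cons y Y ih =>
    rw [PySem.List.enumerate_cons, List.map_cons, ih (s + 1), List.length_cons,
      List.range_succ_eq_map, List.map_cons, List.map_map]
    congr 1
    · simp
    · apply List.map_congr_left
      intro j _
      simp only [Function.comp_apply, List.getD_cons_succ]
      congr 1
      push_cast
      ring

theorem pvA_eq (autre_truc : List (Int × String)) :
    dict_players_attak_rank autre_truc
      = (PySem.List.enumerate
            (PySem.Set.ofList ((PySem.List.sorted autre_truc (fun p => p.1) true).map (·.1))) 0).map
          (fun p => (pvLabel p.1, p.2, (autre_truc.filter (fun e => e.1 == p.2)).map (·.2))) := by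
  unfold dict_players_attak_rank
  dsimp only
  set dicoUn : PySem.Dict Int (List String) :=
    autre_truc.foldl (fun d p => d.modify p.1 [] (fun l => l ++ [p.2])) PySem.Dict.empty with hdicoUn
  set Y0 : List Int :=
    PySem.Set.ofList ((PySem.List.sorted autre_truc (fun p => p.1) true).map (·.1)) with hY0
  set g : Int → Int × List String :=
    (fun k => (k, (autre_truc.filter (fun e => e.1 == k)).map (·.2))) with hg
  have hkeys : dicoUn.keys = PySem.Set.ofList (autre_truc.map (·.1)) := by
    rw [hdicoUn, PySem.Dict.keys_foldl_modify_key autre_truc (fun p => p.1) [] (fun d p l => l ++ [p.2])]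
    simp [PySem.Set.update_nil_left]
  have hnodup : dicoUn.keys.Nodup := by
    rw [hkeys]; exact PySem.Set.nodup_ofList _
  have hgetD : ∀ c, dicoUn.getD c [] = (autre_truc.filter (fun e => e.1 == c)).map (·.2) := by
    intro c
    rw [hdicoUn, PySem.Dict.getD_foldl_modify_append]
    simp
  have hitems : dicoUn.items = (PySem.Set.ofList (autre_truc.map (·.1))).map g := by
    rw [PySem.Dict.items_eq_map_keys dicoUn hnodup [], hkeys]
    exact List.map_congr_left (fun k _ => by rw [hg]; simp [hgetD k])
  -- Y0 is a permutation of the insertion-order key set, strictly descending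
  have hmem : ∀ x : Int, x ∈ Y0 ↔ x ∈ PySem.Set.ofList (autre_truc.map (·.1)) := by
    intro x
    rw [hY0, PySem.Set.mem_ofList, PySem.Set.mem_ofList]
    exact ((PySem.List.sorted_perm autre_truc (fun p => p.1) true).map (·.1)).mem_iff
  have hYperm : Y0.Perm (PySem.Set.ofList (autre_truc.map (·.1))) :=
    (List.perm_ext_iff_of_nodup (PySem.Set.nodup_ofList _) (PySem.Set.nodup_ofList _)).2 hmem
  have hYpair : Y0.Pairwise (fun a b => b < a) := by
    have hmp : ((PySem.List.sorted autre_truc (fun p => p.1) true).map (·.1)).Pairwise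
        (fun a b => b ≤ a) :=
      (PySem.List.sorted_pairwise_rev autre_truc (fun p : Int × String => p.1)).map _ (fun a b h => h)
    have hle : Y0.Pairwise (fun a b => b ≤ a) := hmp.sublist (pvOfList_sublist _)
    have hne : Y0.Pairwise (fun a b => a ≠ b) := PySem.Set.nodup_ofList _
    exact (hle.and hne).imp (fun h => lt_of_le_of_ne h.1 (Ne.symm h.2))
  have htest : PySem.List.sorted dicoUn.items (fun p => p.1) true = Y0.map g := by
    apply PySem.List.sorted_rev_eq_of_perm_of_pairwise_gt
    · rw [hitems]; exact hYperm.map g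
    · exact hYpair.map g (fun a b h => by simp [hg]; exact h)
  have hsize : dicoUn.size = Y0.length := by
    have : dicoUn.size = dicoUn.items.length := rfl
    rw [this, hitems, List.length_map, ← hYperm.length_eq]
  rw [htest, hsize]
  -- the final insertion loop over fresh distinct labels
  rw [PySem.Dict.items_foldl_insert_fresh _ pvLabel _ PySem.Dict.empty
      (fun a _ => PySem.Dict.contains_empty _)
      (by
        apply (PySem.List.nodup_pyRange_one 0 _).map_on
        intro x hx y hy hxy
        exact pvLabel_inj ((PySem.List.mem_pyRange_one.1 hx).1)
          ((PySem.List.mem_pyRange_one.1 hy).1) hxy)]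
  rw [pvEnum_map (fun i k => (pvLabel i, g k)) 0 Y0 0, PySem.List.pyRange_one, List.map_map]
  simp only [Int.sub_zero, Int.toNat_natCast]
  apply List.map_congr_left
  intro j hj
  have hj' : j < Y0.length := List.mem_range.1 hj
  simp only [Function.comp_apply, Int.zero_add]
  congr 1
  rw [PySem.List.pyGetD_natCast]
  rw [List.getD_eq_getElem?_getD, List.getD_eq_getElem?_getD, List.getElem?_map,
    List.getElem?_eq_getElem hj']
  simp


theorem pvB_eq (autre_truc : List (Int × String)) :
    dict_players_attak_rank_alt autre_truc
      = (PySem.List.enumerate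
            (PySem.Set.ofList ((PySem.List.sorted autre_truc (fun p => p.1) true).map (·.1))) 0).map
          (fun p => (pvLabel p.1, p.2, (autre_truc.filter (fun e => e.1 == p.2)).map (·.2))) := by
  rw [dict_players_attak_rank_alt,
    pvGroupLoop_eq _ (PySem.List.sorted_pairwise_rev autre_truc (fun p : Int × String => p.1)) 0]
  apply List.map_congr_left
  intro p _
  rw [pvSorted_filter]

-- ===== VERDICT (by name: the statement is the Claim_ definition above) =====
theorem dict_players_attak_rank_spec : Claim_equal_dict_players_attak_rank := by
  intro autre_truc _
  unfold Spec_dict_players_attak_rank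
  rw [pvA_eq, pvB_eq]
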